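-- pv_equiv track=rewrite | github.com/rejivelshan/db_ai_agent | core/schema_mapper.py | unique_key_score
-- ===== SOURCE A (Python) =====
-- def singularize(name):
--     if name.endswith("ies") and len(name) > 3:
--         return name[:-3] + "y"
--     if name.endswith("s") and len(name) > 3:
--         return name[:-1]
--     return name
--
-- IDENTIFIER_TOKENS = {"id", "number", "code", "ref", "key"}
--
-- ENTITY_KEY_TOKENS = {"name", "email", "phone", "mobile", "username", "login"}
--
-- ATTRIBUTE_TOKENS = {
--     "amount",
--     "balance",
--     "city",
--     "country",
--     "date",
--     "duration",
--     "fare",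
--     "grade",
--     "price",
--     "rating",
--     "state",
--     "status",
--     "time",
--     "type",
-- }
--
-- MEASURE_TOKENS = {"amount", "fare", "price", "balance", "rating", "status", "date", "time"}
--
-- def tokenize(name):
--     return [singularize(token) for token in name.lower().split("_") if token]
--
-- def is_identifier_like(name):
--     return any(token in IDENTIFIER_TOKENS for token in tokenize(name))
--
-- def is_entity_key_like(name):
--     return any(token in ENTITY_KEY_TOKENS for token in tokenize(name))
--
-- def is_measure_like(name):
--     return any(token in MEASURE_TOKENS for token in tokenize(name))
--
-- def unique_key_score(combo):
--     identifier_count = sum(1 for column in combo if is_identifier_like(column))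
--     entity_key_count = sum(1 for column in combo if is_entity_key_like(column))
--     attribute_count = sum(
--         1
--         for column in combo
--         if any(token in ATTRIBUTE_TOKENS for token in tokenize(column))
--     )
--     specificity = sum(
--         sum(token not in ATTRIBUTE_TOKENS for token in tokenize(column))
--         for column in combo
--     )
--     return (
--         attribute_count,
--         sum(1 for column in combo if is_measure_like(column)),
--         -identifier_count,
--         -entity_key_count,
--         -specificity,
--         len(combo),
--         combo,
--     )
-- ===== SOURCE B (Python) =====
-- IDENTIFIER_TOKENS = {"id", "number", "code", "ref", "key"}
-- ENTITY_KEY_TOKENS = {"name", "email", "phone", "mobile", "username", "login"}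
-- ATTRIBUTE_TOKENS = {
--     "amount", "balance", "city", "country", "date", "duration", "fare",
--     "grade", "price", "rating", "state", "status", "time", "type",
-- }
-- MEASURE_TOKENS = {"amount", "fare", "price", "balance", "rating", "status", "date", "time"}
--
--
-- def singularize(name):
--     if name.endswith("ies") and len(name) > 3:
--         return name[:-3] + "y"
--     if name.endswith("s") and len(name) > 3:
--         return name[:-1]
--     return name
--
--
-- def tokenize(name):
--     return [singularize(token) for token in name.lower().split("_") if token]
--
--
-- def unique_key_score(combo):
--     identifier_count = entity_key_count = measure_count = attribute_count = 0
--     specificity = 0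
--     for column in combo:
--         toks = tokenize(column)
--         if any(t in IDENTIFIER_TOKENS for t in toks):
--             identifier_count += 1
--         if any(t in ENTITY_KEY_TOKENS for t in toks):
--             entity_key_count += 1
--         if any(t in MEASURE_TOKENS for t in toks):
--             measure_count += 1
--         if any(t in ATTRIBUTE_TOKENS for t in toks):
--             attribute_count += 1
--         specificity += sum(1 for t in toks if t not in ATTRIBUTE_TOKENS)
--     return (
--         attribute_count,
--         measure_count,
--         -identifier_count,
--         -entity_key_count,
--         -specificity,
--         len(combo),
--         combo,
--     )
-- ===== Notes on version B (the rewrite author's own statement) =====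
-- stated objective: simpler
-- what changed: Replaced A's five independent generator-expression passes over combo (each re-tokenizing every column, up to four times per column) by a single loop that tokenizes each column once and updates all five counters from those tokens.
import Mathlib
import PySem

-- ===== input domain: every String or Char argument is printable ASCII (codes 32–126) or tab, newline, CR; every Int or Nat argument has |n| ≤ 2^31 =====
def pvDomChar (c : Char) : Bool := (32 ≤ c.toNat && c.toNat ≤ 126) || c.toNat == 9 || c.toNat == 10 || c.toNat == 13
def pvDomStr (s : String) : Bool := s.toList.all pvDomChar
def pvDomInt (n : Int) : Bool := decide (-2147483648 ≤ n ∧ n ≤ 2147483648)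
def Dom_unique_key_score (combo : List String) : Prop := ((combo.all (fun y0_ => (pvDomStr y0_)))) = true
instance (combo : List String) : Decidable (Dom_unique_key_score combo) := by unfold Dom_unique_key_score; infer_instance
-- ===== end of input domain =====

-- B replaces A's five independent passes over combo (each re-tokenizing every column)
-- by one fold that tokenizes each column once and updates all five counters (objective: simpler/fused single pass).

-- ===== PORT A =====
-- shared module helpers (identical source in Source A and Source B)
def pvSingularize (s : List Char) : List Char :=
  if PySem.Chars.endswith s "ies".toList && decide (3 < s.length) then
    PySem.Chars.slice s none (some (-3)) ++ "y".toList
  else if PySem.Chars.endswith s "s".toList && decide (3 < s.length) then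
    PySem.Chars.slice s none (some (-1))
  else s

def pvIdentifierTokens : List (List Char) :=
  ["id".toList, "number".toList, "code".toList, "ref".toList, "key".toList]
def pvEntityKeyTokens : List (List Char) :=
  ["name".toList, "email".toList, "phone".toList, "mobile".toList, "username".toList, "login".toList]
def pvAttributeTokens : List (List Char) :=
  ["amount".toList, "balance".toList, "city".toList, "country".toList, "date".toList,
   "duration".toList, "fare".toList, "grade".toList, "price".toList, "rating".toList,
   "state".toList, "status".toList, "time".toList, "type".toList]
def pvMeasureTokens : List (List Char) :=
  ["amount".toList, "fare".toList, "price".toList, "balance".toList, "rating".toList,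
   "status".toList, "date".toList, "time".toList]

def pvTokenize (name : String) : List (List Char) :=
  ((PySem.Chars.splitOn (PySem.Chars.lower name.toList) "_".toList).filter
    (fun t => !t.isEmpty)).map pvSingularize

def pvIsIdentifierLike (name : String) : Bool :=
  (pvTokenize name).any (fun t => pvIdentifierTokens.contains t)
def pvIsEntityKeyLike (name : String) : Bool :=
  (pvTokenize name).any (fun t => pvEntityKeyTokens.contains t)
def pvIsMeasureLike (name : String) : Bool :=
  (pvTokenize name).any (fun t => pvMeasureTokens.contains t)

def unique_key_score (combo : List String) : Int × Int × Int × Int × Int × Int × List String :=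
  let identifier_count : Int :=
    (combo.map (fun column => if pvIsIdentifierLike column then (1 : Int) else 0)).sum
  let entity_key_count : Int :=
    (combo.map (fun column => if pvIsEntityKeyLike column then (1 : Int) else 0)).sum
  let attribute_count : Int :=
    (combo.map (fun column =>
      if (pvTokenize column).any (fun t => pvAttributeTokens.contains t) then (1 : Int) else 0)).sum
  let specificity : Int :=
    (combo.map (fun column =>
      ((pvTokenize column).map (fun t => if !pvAttributeTokens.contains t then (1 : Int) else 0)).sum)).sum
  (attribute_count,
   (combo.map (fun column => if pvIsMeasureLike column then (1 : Int) else 0)).sum,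
   -identifier_count, -entity_key_count, -specificity, PySem.List.len combo, combo)

-- ===== PORT B =====
def unique_key_score_alt (combo : List String) : Int × Int × Int × Int × Int × Int × List String :=
  let r : Int × Int × Int × Int × Int :=
    combo.foldl (fun acc column =>
      let toks := pvTokenize column
      (acc.1 + (if toks.any (fun t => pvIdentifierTokens.contains t) then 1 else 0),
       acc.2.1 + (if toks.any (fun t => pvEntityKeyTokens.contains t) then 1 else 0),
       acc.2.2.1 + (if toks.any (fun t => pvMeasureTokens.contains t) then 1 else 0),
       acc.2.2.2.1 + (if toks.any (fun t => pvAttributeTokens.contains t) then 1 else 0),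
       acc.2.2.2.2 + ((toks.filter (fun t => !pvAttributeTokens.contains t)).length : Int)))
      (0, 0, 0, 0, 0)
  (r.2.2.2.1, r.2.2.1, -r.1, -r.2.1, -r.2.2.2.2, PySem.List.len combo, combo)

-- ===== PRECONDITION & SPEC =====
def Spec_unique_key_score (combo : List String) (out : Int × Int × Int × Int × Int × Int × List String) : Prop := out = unique_key_score_alt combo
instance (combo : List String) (out : Int × Int × Int × Int × Int × Int × List String) : Decidable (Spec_unique_key_score combo out) := by
  unfold Spec_unique_key_score
  -- default instance search exceeds its size limit on this 7-tuple; assemble the product instance stepwise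
  have h1 : DecidableEq (Int × List String) := inferInstance
  have h2 : DecidableEq (Int × Int × List String) := @instDecidableEqProd _ _ _ h1
  have h3 : DecidableEq (Int × Int × Int × List String) := @instDecidableEqProd _ _ _ h2
  have h4 : DecidableEq (Int × Int × Int × Int × List String) := @instDecidableEqProd _ _ _ h3
  have h5 : DecidableEq (Int × Int × Int × Int × Int × List String) := @instDecidableEqProd _ _ _ h4
  have h6 : DecidableEq (Int × Int × Int × Int × Int × Int × List String) := @instDecidableEqProd _ _ _ h5
  exact h6 out _

-- ===== CLAIM (what is proved, stated in full; the proofs are below) =====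
def Claim_equal_unique_key_score : Prop := ∀ (combo : List String), Dom_unique_key_score combo → Spec_unique_key_score combo (unique_key_score combo)

-- ===== LEMMAS AND PROOFS =====

-- the fused fold of B equals the five independent sums of A, for any starting accumulator
theorem pv_fold_eq (combo : List String) (a b c d e : Int) :
    combo.foldl (fun acc column =>
      let toks := pvTokenize column
      (acc.1 + (if toks.any (fun t => pvIdentifierTokens.contains t) then 1 else 0),
       acc.2.1 + (if toks.any (fun t => pvEntityKeyTokens.contains t) then 1 else 0),
       acc.2.2.1 + (if toks.any (fun t => pvMeasureTokens.contains t) then 1 else 0),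
       acc.2.2.2.1 + (if toks.any (fun t => pvAttributeTokens.contains t) then 1 else 0),
       acc.2.2.2.2 + ((toks.filter (fun t => !pvAttributeTokens.contains t)).length : Int)))
      (a, b, c, d, e)
    = (a + (combo.map (fun column => if pvIsIdentifierLike column then (1 : Int) else 0)).sum,
       b + (combo.map (fun column => if pvIsEntityKeyLike column then (1 : Int) else 0)).sum,
       c + (combo.map (fun column => if pvIsMeasureLike column then (1 : Int) else 0)).sum,
       d + (combo.map (fun column =>
              if (pvTokenize column).any (fun t => pvAttributeTokens.contains t) then (1 : Int) else 0)).sum,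
       e + (combo.map (fun column =>
              ((pvTokenize column).map (fun t => if !pvAttributeTokens.contains t then (1 : Int) else 0)).sum)).sum) := by
  induction combo generalizing a b c d e with
  | nil => simp
  | cons x xs ih =>
    simp only [List.foldl_cons, List.map_cons, List.sum_cons, ih,
      pvIsIdentifierLike, pvIsEntityKeyLike, pvIsMeasureLike,
      PySem.List.sum_map_ite_one_zero, List.countP_eq_length_filter]
    simp only [Prod.mk.injEq]
    exact ⟨add_assoc _ _ _, add_assoc _ _ _, add_assoc _ _ _, add_assoc _ _ _, add_assoc _ _ _⟩

-- ===== VERDICT (by name: the statement is the Claim_ definition above) =====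
theorem unique_key_score_spec : Claim_equal_unique_key_score := by
  intro combo _
  unfold Spec_unique_key_score unique_key_score unique_key_score_alt
  rw [pv_fold_eq]
  simp [PySem.List.sum_map_ite_one_zero, List.countP_eq_length_filter]
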